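-- pv_equiv track=rewrite | github.com/Silvador386/FAV-PDetection | code/predict.py | select_key_frames
-- ===== SOURCE A (Python) =====
-- def select_key_frames(image_names, frame_rate, key_zone_frame_rate, key_frame_zones):
--     selected_fr_idxs_and_img_names = []
--
--     for frame_idx, image_name in enumerate(image_names):
--         if in_key_zone(frame_idx, key_frame_zones):
--             if frame_idx % key_zone_frame_rate == 0:
--                 selected_fr_idxs_and_img_names.append((frame_idx, image_name))
--         else:
--             if frame_idx % frame_rate == 0:
--                 selected_fr_idxs_and_img_names.append((frame_idx, image_name))
--
--     return selected_fr_idxs_and_img_names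
--
-- def in_key_zone(frame_idx, key_frame_zones):
--     if key_frame_zones:
--         if any([zone[0] < frame_idx < zone[1] for zone in key_frame_zones]):
--             return True
--     return False
-- ===== SOURCE B (Python) =====
-- def select_key_frames(image_names, frame_rate, key_zone_frame_rate, key_frame_zones):
--     n = len(image_names)
--     covered = set()
--     for zone in key_frame_zones:
--         covered.update(range(max(zone[0] + 1, 0), min(zone[1], n)))
--     selected = []
--     for idx, name in enumerate(image_names):
--         rate = key_zone_frame_rate if idx in covered else frame_rate
--         if idx % rate == 0:
--             selected.append((idx, name))
--     return selected
-- ===== Notes on version B (the rewrite author's own statement) =====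
-- stated objective: faster
-- what changed: B precomputes the set of zone-covered frame indices once (each zone clamped to [0, n) and expanded into the set), then does a single pass over the frames with an O(1) membership lookup, instead of A's per-frame scan over all zones.
import Mathlib
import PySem

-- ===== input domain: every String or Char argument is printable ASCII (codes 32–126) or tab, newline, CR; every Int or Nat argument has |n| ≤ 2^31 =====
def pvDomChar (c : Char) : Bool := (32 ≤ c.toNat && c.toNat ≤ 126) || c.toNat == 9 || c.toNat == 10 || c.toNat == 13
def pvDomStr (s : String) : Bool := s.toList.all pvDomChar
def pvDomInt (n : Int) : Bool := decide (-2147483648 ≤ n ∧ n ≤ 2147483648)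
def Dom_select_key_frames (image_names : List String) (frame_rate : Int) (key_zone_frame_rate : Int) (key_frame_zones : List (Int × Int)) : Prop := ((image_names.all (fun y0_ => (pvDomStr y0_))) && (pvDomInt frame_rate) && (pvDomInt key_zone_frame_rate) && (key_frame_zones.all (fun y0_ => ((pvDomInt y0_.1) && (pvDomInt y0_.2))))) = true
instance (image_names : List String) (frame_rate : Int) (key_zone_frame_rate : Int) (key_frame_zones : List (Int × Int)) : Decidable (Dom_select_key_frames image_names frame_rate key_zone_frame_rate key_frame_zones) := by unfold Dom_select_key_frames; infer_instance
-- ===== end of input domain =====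

-- B replaces A's per-frame scan over all zones by one precomputed set of covered
-- frame indices (zones clamped to [0, n)) plus an O(1) membership lookup per frame.

-- ===== PORT A =====
def in_key_zone (frame_idx : Int) (key_frame_zones : List (Int × Int)) : Bool :=
  if !key_frame_zones.isEmpty then
    if key_frame_zones.any (fun zone => decide (zone.1 < frame_idx ∧ frame_idx < zone.2)) then
      true
    else false
  else false

def select_key_frames (image_names : List String) (frame_rate : Int) (key_zone_frame_rate : Int) (key_frame_zones : List (Int × Int)) : List (Int × String) :=
  (PySem.List.enumerate image_names).foldl (fun acc p =>
    if in_key_zone p.1 key_frame_zones then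
      if PySem.Int.mod p.1 key_zone_frame_rate == 0 then acc ++ [p] else acc
    else
      if PySem.Int.mod p.1 frame_rate == 0 then acc ++ [p] else acc) []

-- ===== PORT B =====
def skf_covered (n : Int) (key_frame_zones : List (Int × Int)) : PySem.Set Int :=
  key_frame_zones.foldl
    (fun s zone => PySem.Set.update s (PySem.List.pyRange (max (zone.1 + 1) 0) (min zone.2 n) 1))
    PySem.Set.empty

def select_key_frames_alt (image_names : List String) (frame_rate : Int) (key_zone_frame_rate : Int) (key_frame_zones : List (Int × Int)) : List (Int × String) :=
  let n : Int := image_names.length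
  let covered := skf_covered n key_frame_zones
  (PySem.List.enumerate image_names).foldl (fun acc p =>
    let rate := if PySem.Set.contains covered p.1 then key_zone_frame_rate else frame_rate
    if PySem.Int.mod p.1 rate == 0 then acc ++ [p] else acc) []

-- ===== PRECONDITION & SPEC =====
-- Pre_ excludes exactly the inputs where Python A raises ZeroDivisionError: a frame
-- inside some zone while key_zone_frame_rate = 0, or a frame outside every zone
-- while frame_rate = 0.
def Pre_select_key_frames (image_names : List String) (frame_rate : Int) (key_zone_frame_rate : Int) (key_frame_zones : List (Int × Int)) : Prop :=
  ∀ i ∈ PySem.List.pyRange 0 (image_names.length : Int) 1,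
    if key_frame_zones.any (fun zone => decide (zone.1 < i ∧ i < zone.2)) then
      key_zone_frame_rate ≠ 0
    else frame_rate ≠ 0
instance (image_names : List String) (frame_rate : Int) (key_zone_frame_rate : Int) (key_frame_zones : List (Int × Int)) : Decidable (Pre_select_key_frames image_names frame_rate key_zone_frame_rate key_frame_zones) := by unfold Pre_select_key_frames; infer_instance

def pvWitness_select_key_frames : List String × Int × Int × (List (Int × Int)) :=
  (["a.png", "b.png", "c.png", "d.png"], 2, 1, [(0, 3)])

def Spec_select_key_frames (image_names : List String) (frame_rate : Int) (key_zone_frame_rate : Int) (key_frame_zones : List (Int × Int)) (out : List (Int × String)) : Prop := out = select_key_frames_alt image_names frame_rate key_zone_frame_rate key_frame_zones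
instance (image_names : List String) (frame_rate : Int) (key_zone_frame_rate : Int) (key_frame_zones : List (Int × Int)) (out : List (Int × String)) : Decidable (Spec_select_key_frames image_names frame_rate key_zone_frame_rate key_frame_zones out) := by unfold Spec_select_key_frames; infer_instance

-- ===== CLAIM (what is proved, stated in full; the proofs are below) =====
def Claim_equal_select_key_frames : Prop := ∀ (image_names : List String) (frame_rate : Int) (key_zone_frame_rate : Int) (key_frame_zones : List (Int × Int)), Dom_select_key_frames image_names frame_rate key_zone_frame_rate key_frame_zones → Pre_select_key_frames image_names frame_rate key_zone_frame_rate key_frame_zones → Spec_select_key_frames image_names frame_rate key_zone_frame_rate key_frame_zones (select_key_frames image_names frame_rate key_zone_frame_rate key_frame_zones)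

-- ===== LEMMAS AND PROOFS =====

-- Membership in the accumulated covered set.
theorem mem_skf_covered_foldl (n : Int) (zones : List (Int × Int)) (s : PySem.Set Int) (i : Int) :
    i ∈ zones.foldl
        (fun s zone => PySem.Set.update s (PySem.List.pyRange (max (zone.1 + 1) 0) (min zone.2 n) 1)) s
      ↔ i ∈ s ∨ ∃ z ∈ zones, max (z.1 + 1) 0 ≤ i ∧ i < min z.2 n := by
  induction zones generalizing s with
  | nil => simp
  | cons z zs ih =>
    simp only [List.foldl_cons, ih, PySem.Set.mem_update, PySem.List.mem_pyRange_one,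
      List.mem_cons]
    constructor
    · rintro ((h | h) | ⟨w, hw, hb⟩)
      · exact Or.inl h
      · exact Or.inr ⟨z, Or.inl rfl, h⟩
      · exact Or.inr ⟨w, Or.inr hw, hb⟩
    · rintro (h | ⟨w, (rfl | hw), hb⟩)
      · exact Or.inl (Or.inl h)
      · exact Or.inl (Or.inr hb)
      · exact Or.inr ⟨w, hw, hb⟩

-- For an in-range frame index, the set lookup agrees with A's per-frame zone scan.
theorem contains_skf_covered (n : Int) (zones : List (Int × Int)) (i : Int)
    (h0 : 0 ≤ i) (hn : i < n) :
    PySem.Set.contains (skf_covered n zones) i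
      = zones.any (fun zone => decide (zone.1 < i ∧ i < zone.2)) := by
  rcases hb : zones.any (fun zone => decide (zone.1 < i ∧ i < zone.2)) with _ | _
  · rw [Bool.eq_false_iff]
    intro hc
    rw [PySem.Set.contains_iff, skf_covered, mem_skf_covered_foldl] at hc
    rcases hc with h | ⟨z, hz, hlo, hhi⟩
    · simp [PySem.Set.empty] at h
    · rw [List.any_eq_false] at hb
      have := hb z hz
      simp only [decide_eq_true_eq] at this
      omega
  · rw [List.any_eq_true] at hb
    obtain ⟨z, hz, hzi⟩ := hb
    simp only [decide_eq_true_eq] at hzi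
    rw [PySem.Set.contains_iff, skf_covered, mem_skf_covered_foldl]
    exact Or.inr ⟨z, hz, by omega⟩

-- A's helper is just the any-scan.
theorem in_key_zone_eq_any (i : Int) (zones : List (Int × Int)) :
    in_key_zone i zones = zones.any (fun zone => decide (zone.1 < i ∧ i < zone.2)) := by
  cases zones <;> simp [in_key_zone]

-- ===== VERDICT (by name: the statement is the Claim_ definition above) =====
theorem select_key_frames_spec : Claim_equal_select_key_frames := by
  intro image_names frame_rate key_zone_frame_rate key_frame_zones _ _
  unfold Spec_select_key_frames select_key_frames select_key_frames_alt
  apply PySem.List.foldl_congr_mem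
  intro acc p hp
  rw [PySem.List.mem_enumerate_iff] at hp
  obtain ⟨k, hk, rfl⟩ := hp
  have h0 : (0 : Int) ≤ 0 + (k : Int) := by omega
  have hn : (0 : Int) + (k : Int) < (image_names.length : Int) := by exact_mod_cast by omega
  rw [in_key_zone_eq_any, ← contains_skf_covered (image_names.length : Int) key_frame_zones _ h0 hn]
  rcases hc : PySem.Set.contains (skf_covered (image_names.length : Int) key_frame_zones) (0 + (k : Int)) with _ | _ <;> simp
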